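-- pv_equiv track=rewrite | github.com/dainst/gelehrtenkorrespondenz-21 | data_access/util.py | items_around
-- ===== SOURCE A (Python) =====
-- from typing import Iterator, List, Sequence, TypeVar
--
-- T = TypeVar('T')
--
-- def items_around(items: Sequence[T], start: int, window_size=5) -> Iterator[T]:
--     """
--     Generate items at start index and nearest to it:
--     One before, one after, two before, ...
--     Stop at window_size items in each direction. The default window_size
--     of 5 would e.g. yield a maximum of 11 items.
--     Does not yield any items if start is not an index of items.
--     """
--     if start < 0 or start >= len(items):
--         return []
--     indices = [start] if window_size > 0 else []
--     for i in range(1, window_size + 1):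
--         indices.append(start - i)
--         indices.append(start + i)
--     for idx in indices:
--         if 0 <= idx < len(items):
--             yield items[idx]
-- ===== SOURCE B (Python) =====
-- def items_around(items, start, window_size=5):
--     """Yield items[start] and neighbours by nearness (before precedes after at
--     equal distance), up to window_size in each direction."""
--     if start < 0 or start >= len(items) or window_size <= 0:
--         return
--     lo = max(0, start - window_size)
--     hi = min(len(items), start + window_size + 1)
--     for idx in sorted(range(lo, hi), key=lambda i: 2 * abs(i - start) + (i >= start)):
--         yield items[idx]
-- ===== Notes on version B (the rewrite author's own statement) =====
-- stated objective: alternative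
-- what changed: A generates indices in interleaved order (start, start-1, start+1, ...) and filters each against the bounds; B computes the in-range window [max(0,start-w), min(len,start+w+1)) once and stably sorts those indices by a nearness key (2*|i-start| + (i>=start)), so no per-index bounds test remains.
import Mathlib
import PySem

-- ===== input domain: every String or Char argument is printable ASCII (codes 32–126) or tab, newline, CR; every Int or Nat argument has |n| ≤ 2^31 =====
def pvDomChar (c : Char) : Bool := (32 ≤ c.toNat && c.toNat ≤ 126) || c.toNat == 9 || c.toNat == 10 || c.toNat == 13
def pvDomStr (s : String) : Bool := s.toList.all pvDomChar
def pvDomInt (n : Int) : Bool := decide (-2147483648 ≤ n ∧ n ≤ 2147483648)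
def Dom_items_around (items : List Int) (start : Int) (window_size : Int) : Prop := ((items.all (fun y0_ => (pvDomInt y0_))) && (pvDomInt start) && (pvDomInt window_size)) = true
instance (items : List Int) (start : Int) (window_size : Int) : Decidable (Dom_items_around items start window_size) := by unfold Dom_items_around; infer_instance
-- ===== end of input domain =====

-- B replaces A's interleaved index generation (start, start-1, start+1, …, then a bounds
-- filter) by building the in-range index window once and sorting it by nearness to start
-- (before preferred at equal distance); objective: alternative decomposition, same cost.

-- ===== PORT A =====
-- literal transliteration of Source A (the generator's yields collected as a list)
def items_around (items : List Int) (start : Int) (window_size : Int) : List Int :=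
  if start < 0 ∨ (items.length : Int) ≤ start then []
  else
    ((PySem.List.pyRange 1 (window_size + 1)).foldl
        (fun acc i => acc ++ [start - i, start + i])
        (if 0 < window_size then [start] else [])).foldl
      (fun out idx =>
        if 0 ≤ idx ∧ idx < (items.length : Int)
        then out ++ [PySem.List.pyGetD items idx 0] else out) []

-- ===== PORT B =====
-- literal transliteration of Source B: guard, window bounds, sort range by nearness key, map
def items_around_alt (items : List Int) (start : Int) (window_size : Int) : List Int :=
  if start < 0 ∨ (items.length : Int) ≤ start ∨ window_size ≤ 0 then []
  else
    (PySem.List.sorted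
        (PySem.List.pyRange (max 0 (start - window_size))
          (min (items.length : Int) (start + window_size + 1)))
        (fun i => 2 * |i - start| + (if start ≤ i then 1 else 0))).map
      (fun idx => PySem.List.pyGetD items idx 0)

-- ===== PRECONDITION & SPEC =====
def Spec_items_around (items : List Int) (start : Int) (window_size : Int) (out : List Int) : Prop := out = items_around_alt items start window_size
instance (items : List Int) (start : Int) (window_size : Int) (out : List Int) : Decidable (Spec_items_around items start window_size out) := by unfold Spec_items_around; infer_instance

-- ===== CLAIM (what is proved, stated in full; the proofs are below) =====
def Claim_equal_items_around : Prop := ∀ (items : List Int) (start : Int) (window_size : Int), Dom_items_around items start window_size → Spec_items_around items start window_size (items_around items start window_size)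

-- ===== LEMMAS AND PROOFS =====

-- B's sort key in closed form
theorem key_eval (s x : Int) :
    2 * |x - s| + (if s ≤ x then 1 else 0) = if s ≤ x then 2 * (x - s) + 1 else 2 * (s - x) := by
  by_cases h : s ≤ x
  · rw [if_pos h, if_pos h, abs_of_nonneg (by omega)]
  · rw [if_neg h, if_neg h, abs_of_neg (by omega)]
    ring

-- the heart: the stable sort of the window range by the nearness key is exactly
-- A's interleaved index list after its bounds filter
theorem around_sorted_eq (n s w : Int) (hs0 : 0 ≤ s) (hsn : s < n) (hw : 0 < w) :
    PySem.List.sorted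
        (PySem.List.pyRange (max 0 (s - w)) (min n (s + w + 1)))
        (fun i => 2 * |i - s| + (if s ≤ i then 1 else 0)) =
      ([s] ++ (PySem.List.pyRange 1 (w + 1)).flatMap (fun i => [s - i, s + i])).filter
        (fun idx => decide (0 ≤ idx ∧ idx < n)) := by
  set key : Int → Int := fun i => 2 * |i - s| + (if s ≤ i then 1 else 0) with hkey
  set F := ([s] ++ (PySem.List.pyRange 1 (w + 1)).flatMap (fun i => [s - i, s + i])).filter
      (fun idx => decide (0 ≤ idx ∧ idx < n)) with hF
  have hkx : ∀ x, key x = if s ≤ x then 2 * (x - s) + 1 else 2 * (s - x) := fun x => key_eval s x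
  -- the unfiltered interleaved list is strictly increasing in the key
  have hpwAll : ([s] ++ (PySem.List.pyRange 1 (w + 1)).flatMap (fun i => [s - i, s + i])).Pairwise
      (fun a b => key a < key b) := by
    rw [List.singleton_append, List.pairwise_cons]
    constructor
    · intro b hb
      rw [List.mem_flatMap] at hb
      obtain ⟨i, hi, hbg⟩ := hb
      rw [PySem.List.mem_pyRange_one] at hi
      simp only [List.mem_cons, List.not_mem_nil, or_false] at hbg
      rw [hkx, hkx]
      rcases hbg with rfl | rfl <;> split_ifs <;> omega
    · rw [List.pairwise_flatMap]
      refine ⟨?_, ?_⟩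
      · intro i hi
        rw [PySem.List.mem_pyRange_one] at hi
        refine List.pairwise_pair.mpr ?_
        rw [hkx, hkx]
        split_ifs <;> omega
      · refine List.Pairwise.imp_of_mem ?_ (PySem.List.pairwise_lt_pyRange_one 1 (w + 1))
        intro a b ha hb hab x hx y hy
        rw [PySem.List.mem_pyRange_one] at ha hb
        simp only [List.mem_cons, List.not_mem_nil, or_false] at hx hy
        rw [hkx, hkx]
        rcases hx with rfl | rfl <;> rcases hy with rfl | rfl <;> split_ifs <;> omega
  have hpwF : F.Pairwise (fun a b => key a < key b) :=
    List.Pairwise.sublist List.filter_sublist hpwAll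
  have hFnd : F.Nodup := hpwF.imp (fun h => by rintro rfl; exact lt_irrefl _ h)
  have hRnd : (PySem.List.pyRange (max 0 (s - w)) (min n (s + w + 1))).Nodup :=
    (PySem.List.pairwise_lt_pyRange_one _ _).imp (fun h => ne_of_lt h)
  have hmem : ∀ x, x ∈ F ↔ x ∈ PySem.List.pyRange (max 0 (s - w)) (min n (s + w + 1)) := by
    intro x
    rw [PySem.List.mem_pyRange_one, hF, List.mem_filter]
    simp only [List.singleton_append, List.mem_cons, List.mem_flatMap,
      PySem.List.mem_pyRange_one, List.not_mem_nil, or_false, decide_eq_true_eq]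
    constructor
    · rintro ⟨hm, hp⟩
      rcases hm with rfl | ⟨i, hi, rfl | rfl⟩ <;> omega
    · intro hx
      refine ⟨?_, by omega⟩
      by_cases hxs : x = s
      · exact Or.inl hxs
      · rcases lt_or_gt_of_ne hxs with hlt | hgt
        · exact Or.inr ⟨s - x, by omega, Or.inl (by ring)⟩
        · exact Or.inr ⟨x - s, by omega, Or.inr (by ring)⟩
  exact PySem.List.sorted_eq_of_perm_of_pairwise_lt _ _ _
    ((List.perm_ext_iff_of_nodup hFnd hRnd).mpr hmem) hpwF

-- ===== VERDICT (by name: the statement is the Claim_ definition above) =====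
theorem items_around_spec : Claim_equal_items_around := by
  intro items start w _
  unfold Spec_items_around items_around items_around_alt
  by_cases h1 : start < 0 ∨ (items.length : Int) ≤ start
  · rw [if_pos h1, if_pos (by tauto)]
  · rw [if_neg h1]
    push Not at h1
    by_cases h2 : w ≤ 0
    · rw [if_pos (Or.inr (Or.inr h2)),
        PySem.List.pyRange_one_eq_nil (by omega), if_neg (by omega)]
      simp
    · rw [if_pos (show (0:Int) < w by omega),
        PySem.List.foldl_append_eq_flatMap (g := fun i => [start - i, start + i]),
        if_neg (show ¬(start < 0 ∨ (items.length : Int) ≤ start ∨ w ≤ 0) by omega),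
        PySem.List.foldl_append_ite
          (p := fun idx => 0 ≤ idx ∧ idx < (items.length : Int))
          (f := fun idx => PySem.List.pyGetD items idx 0),
        around_sorted_eq (items.length : Int) start w h1.1 h1.2 (by omega)]
      simp
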